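-- pv_equiv track=rewrite | github.com/pypi-data/pypi-mirror-199 | packages/poonia/poonia-0.1.15.tar.gz/poonia-0.1.15/poonia/commands/booksplit.py | list_val_order
-- ===== SOURCE A (Python) =====
-- def list_val_order(lst):
--     i = 0
--     mapping = {}
--     for e in lst:
--         if e in mapping: continue
--         i += 1
--         mapping[e] = i
--     return mapping
-- ===== SOURCE B (Python) =====
-- def list_val_order(lst):
--     # phase 1: ordered dedup
--     seen = set()
--     unique = []
--     for e in lst:
--         if e not in seen:
--             seen.add(e)
--             unique.append(e)
--     # phase 2: rank the distinct elements
--     return {e: i for i, e in enumerate(unique, 1)}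
-- ===== Notes on version B (the rewrite author's own statement) =====
-- stated objective: simpler
-- what changed: Replaces the interleaved membership-guard/counter loop with two explicit phases: an ordered dedup pass followed by a ranking dict comprehension over enumerate(unique, 1).
import Mathlib
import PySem

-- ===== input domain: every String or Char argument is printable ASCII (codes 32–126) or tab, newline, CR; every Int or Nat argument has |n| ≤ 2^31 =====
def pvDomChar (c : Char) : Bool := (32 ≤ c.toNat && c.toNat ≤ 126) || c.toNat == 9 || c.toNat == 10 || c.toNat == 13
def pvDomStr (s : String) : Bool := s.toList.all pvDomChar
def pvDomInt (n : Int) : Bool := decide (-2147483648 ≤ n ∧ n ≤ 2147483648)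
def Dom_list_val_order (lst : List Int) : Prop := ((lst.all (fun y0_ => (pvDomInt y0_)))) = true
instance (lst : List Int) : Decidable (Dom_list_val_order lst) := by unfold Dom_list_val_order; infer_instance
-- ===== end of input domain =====

-- B is a simpler two-phase decomposition (ordered dedup, then ranking); A interleaves a counter with a membership guard.

-- ===== PORT A =====
-- A: single loop maintaining (i, mapping); skips seen elements, otherwise i += 1; mapping[e] = i.
def list_val_order (lst : List Int) : List (Int × Int) :=
  (lst.foldl
    (fun (s : Int × PySem.Dict Int Int) e =>
      if s.2.contains e then s else (s.1 + 1, s.2.insert e (s.1 + 1)))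
    (0, PySem.Dict.empty)).2.items

-- ===== PORT B =====
-- B phase 1: ordered dedup with a seen-set.
def pvBUnique (lst : List Int) : List Int :=
  (lst.foldl
    (fun (s : PySem.Set Int × List Int) e =>
      if PySem.Set.contains s.1 e then s else (PySem.Set.add s.1 e, s.2 ++ [e]))
    (PySem.Set.empty, [])).2

-- B phase 2: {e: i for i, e in enumerate(unique, 1)}
def pvBRank (u : List Int) : PySem.Dict Int Int :=
  (PySem.List.enumerate u 1).foldl (fun d p => d.insert p.2 p.1) PySem.Dict.empty

def list_val_order_alt (lst : List Int) : List (Int × Int) :=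
  (pvBRank (pvBUnique lst)).items

-- ===== PRECONDITION & SPEC =====
def Spec_list_val_order (lst : List Int) (out : List (Int × Int)) : Prop := out = list_val_order_alt lst
instance (lst : List Int) (out : List (Int × Int)) : Decidable (Spec_list_val_order lst out) := by unfold Spec_list_val_order; infer_instance

-- ===== CLAIM (what is proved, stated in full; the proofs are below) =====
def Claim_equal_list_val_order : Prop := ∀ (lst : List Int), Dom_list_val_order lst → Spec_list_val_order lst (list_val_order lst)

-- ===== LEMMAS AND PROOFS =====

-- reference dedup accumulator
def pvAcc (u : List Int) (lst : List Int) : List Int :=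
  lst.foldl (fun u e => if e ∈ u then u else u ++ [e]) u

lemma pvBRank_keys (u : List Int) (h : u.Nodup) : (pvBRank u).keys = u := by
  unfold pvBRank
  rw [PySem.Dict.keys_foldl_insert_key]
  simp [PySem.List.map_snd_enumerate, PySem.Set.update_nil_left,
    PySem.Set.ofList_eq_self_of_nodup u h]

lemma pvBRank_contains (u : List Int) (h : u.Nodup) (e : Int) :
    (pvBRank u).contains e = decide (e ∈ u) := by
  rw [PySem.Dict.contains_eq_decide_mem_keys, pvBRank_keys u h]

lemma pvBRank_snoc (u : List Int) (e : Int) :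
    pvBRank (u ++ [e]) = (pvBRank u).insert e (1 + u.length) := by
  unfold pvBRank
  rw [PySem.List.enumerate_append, List.foldl_append]
  simp

lemma pvFoldA (lst : List Int) : ∀ (u : List Int), u.Nodup →
    lst.foldl
      (fun (s : Int × PySem.Dict Int Int) e =>
        if s.2.contains e then s else (s.1 + 1, s.2.insert e (s.1 + 1)))
      ((u.length : Int), pvBRank u)
    = (((pvAcc u lst).length : Int), pvBRank (pvAcc u lst)) := by
  induction lst with
  | nil => intro u h; simp [pvAcc]
  | cons e t ih =>
    intro u h
    simp only [List.foldl_cons, pvBRank_contains u h e]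
    by_cases he : e ∈ u
    · simp only [he, decide_true, if_true]
      have : pvAcc u (e :: t) = pvAcc u t := by simp [pvAcc, he]
      rw [this]; exact ih u h
    · simp only [he, decide_false, if_false]
      have hstate : ((u.length : Int) + 1, (pvBRank u).insert e ((u.length : Int) + 1))
          = (((u ++ [e]).length : Int), pvBRank (u ++ [e])) := by
        rw [pvBRank_snoc]
        simp [Int.add_comm]
      rw [hstate]
      have hnd : (u ++ [e]).Nodup := by
        refine List.Nodup.append h (List.nodup_singleton e) ?_
        simpa [List.disjoint_singleton] using he
      have hacc : pvAcc u (e :: t) = pvAcc (u ++ [e]) t := by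
        unfold pvAcc; rw [List.foldl_cons, if_neg he]
      rw [hacc]; exact ih (u ++ [e]) hnd

lemma pvFoldB (lst : List Int) : ∀ (u : List Int), u.Nodup →
    lst.foldl
      (fun (s : PySem.Set Int × List Int) e =>
        if PySem.Set.contains s.1 e then s else (PySem.Set.add s.1 e, s.2 ++ [e]))
      (u, u)
    = (pvAcc u lst, pvAcc u lst) := by
  induction lst with
  | nil => intro u h; simp [pvAcc]
  | cons e t ih =>
    intro u h
    simp only [List.foldl_cons]
    by_cases he : e ∈ u
    · have hc : PySem.Set.contains u e = true := by
        simpa [PySem.Set.contains] using he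
      simp only [hc, if_true]
      have : pvAcc u (e :: t) = pvAcc u t := by simp [pvAcc, he]
      rw [this]; exact ih u h
    · have hc : PySem.Set.contains u e = false := by
        simpa [PySem.Set.contains] using he
      have hadd : PySem.Set.add u e = u ++ [e] := by
        simp [PySem.Set.add, PySem.Set.contains, he]
      simp only [hc, hadd]
      have hnd : (u ++ [e]).Nodup := by
        refine List.Nodup.append h (List.nodup_singleton e) ?_
        simpa [List.disjoint_singleton] using he
      have hacc : pvAcc u (e :: t) = pvAcc (u ++ [e]) t := by
        unfold pvAcc; rw [List.foldl_cons, if_neg he]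
      rw [hacc]; exact ih (u ++ [e]) hnd

-- ===== VERDICT (by name: the statement is the Claim_ definition above) =====
theorem list_val_order_spec : Claim_equal_list_val_order := by
  intro lst _
  unfold Spec_list_val_order list_val_order list_val_order_alt pvBUnique
  have hA := pvFoldA lst [] List.nodup_nil
  have hB := pvFoldB lst [] List.nodup_nil
  have h0 : pvBRank ([] : List Int) = PySem.Dict.empty := rfl
  rw [show ((0 : Int), PySem.Dict.empty (κ := Int) (ν := Int)) = (((([] : List Int).length : Int)), pvBRank []) by simp [h0]]
  rw [hA]
  rw [show (PySem.Set.empty (α := Int), ([] : List Int)) = (([] : List Int), ([] : List Int)) from rfl]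
  rw [hB]
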